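-- pv_equiv track=rewrite | github.com/Liwenbin1996/Data_Structures_and_Algorithms | OtherQuestion.py | manacherString
-- ===== SOURCE A (Python) =====
-- def manacherString(string):
--     res = [0 for i in range(len(string) * 2 + 1)]
--     index = 0
--     for i in range(len(res)):
--         if i & 1 == 0:
--             res[i] = "#"
--         else:
--             res[i] = string[index]
--             index += 1
--     return res
-- ===== SOURCE B (Python) =====
-- def manacherString(string):
--     res = ["#"]
--     for ch in string:
--         res.append(ch)
--         res.append("#")
--     return res
-- ===== Notes on version B (the rewrite author's own statement) =====
-- stated objective: idiomatic
-- what changed: B iterates over the input characters appending each character and a separator to a growing list, instead of pre-sizing an output array of length 2n+1 and filling it by output index with a parity branch and a manual index counter.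
import Mathlib
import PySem

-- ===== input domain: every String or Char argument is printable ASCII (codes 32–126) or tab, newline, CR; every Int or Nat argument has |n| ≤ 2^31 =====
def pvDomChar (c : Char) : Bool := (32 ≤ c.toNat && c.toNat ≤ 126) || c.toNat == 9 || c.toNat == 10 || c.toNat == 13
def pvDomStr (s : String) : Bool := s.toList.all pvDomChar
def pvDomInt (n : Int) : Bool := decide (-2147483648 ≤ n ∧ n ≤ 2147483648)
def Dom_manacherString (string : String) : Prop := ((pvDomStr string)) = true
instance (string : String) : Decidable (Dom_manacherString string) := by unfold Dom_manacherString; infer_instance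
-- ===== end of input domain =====

-- B builds the list by appending 'ch' and '#' per input character, replacing A's
-- pre-sized output array filled by index with a parity branch (objective: more idiomatic).

-- ===== PORT A =====
-- res = [0 for i in range(len(string)*2+1)]: the int placeholders are all overwritten,
-- so the placeholder is "" here; string[index] is always in range, so getD "" is never the result.
def manacherString (string : String) : List String :=
  let res : List String :=
    (PySem.List.pyRange 0 (PySem.Str.len string * 2 + 1) 1).map (fun _ => "")
  let r :=
    (PySem.List.pyRange 0 ((res.length : Int)) 1).foldl
      (fun (st : List String × Int) i =>
        if i % 2 == 0 then  -- i & 1 == 0, i ≥ 0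
          (PySem.List.pySetD st.1 i "#", st.2)
        else
          (PySem.List.pySetD st.1 i
            (((PySem.Str.pyGet? string st.2).map (fun c => String.mk [c])).getD ""),
           st.2 + 1))
      (res, 0)
  r.1

-- ===== PORT B =====
def manacherString_alt (string : String) : List String :=
  string.toList.foldl (fun res ch => res ++ [String.mk [ch], "#"]) ["#"]

-- ===== PRECONDITION & SPEC =====
def Spec_manacherString (string : String) (out : List String) : Prop := out = manacherString_alt string
instance (string : String) (out : List String) : Decidable (Spec_manacherString string out) := by unfold Spec_manacherString; infer_instance

-- ===== CLAIM (what is proved, stated in full; the proofs are below) =====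
def Claim_equal_manacherString : Prop := ∀ (string : String), Dom_manacherString string → Spec_manacherString string (manacherString string)

-- ===== LEMMAS AND PROOFS =====

-- the '#'-interleaved list both programs compute
def pvInterleave (s : List Char) : List String :=
  "#" :: s.flatMap (fun c => [String.mk [c], "#"])

theorem pvInterleave_length (s : List Char) : (pvInterleave s).length = 2 * s.length + 1 := by
  induction s with
  | nil => rfl
  | cons c cs ih =>
    simp [pvInterleave, List.flatMap_cons] at *
    omega

theorem pvSet_append_right {α : Type} (P Q : List α) (k : Nat) (v : α) :
    (P ++ Q).set (P.length + k) v = P ++ Q.set k v := by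
  induction P with
  | nil => simp
  | cons x xs ih => simpa [Nat.succ_add] using ih

abbrev pvStep (string : String) : List String × Int → Int → List String × Int :=
  fun st i =>
    if i % 2 == 0 then
      (PySem.List.pySetD st.1 i "#", st.2)
    else
      (PySem.List.pySetD st.1 i
        (((PySem.Str.pyGet? string st.2).map (fun c => String.mk [c])).getD ""),
       st.2 + 1)

theorem pvLoop_inv (string : String) (n L : Nat) (hn : n ≤ string.toList.length)
    (hL : 2 * n + 1 ≤ L) :
    (PySem.List.pyRange 0 (2 * (n : Int) + 1) 1).foldl (pvStep string) (List.replicate L "", 0)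
      = (pvInterleave (string.toList.take n) ++ List.replicate (L - (2 * n + 1)) "", (n : Int)) := by
  induction n with
  | zero =>
    rw [show (2 * ((0:Nat) : Int) + 1) = 0 + 1 by simp, PySem.List.pyRange_one_singleton]
    obtain ⟨L', rfl⟩ : ∃ L', L = L' + 1 := ⟨L - 1, by omega⟩
    simp [pvStep, pvInterleave, List.replicate_succ, PySem.List.pySetD, PySem.List.pySet?, PySem.List.pyIdx?]
  | succ n ih =>
    have hn' : n ≤ string.toList.length := by omega
    have hL' : 2 * n + 1 ≤ L := by omega
    have hsplit : PySem.List.pyRange 0 (2 * ((n : Int) + 1) + 1) 1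
        = PySem.List.pyRange 0 (2 * (n : Int) + 1) 1 ++ [2 * (n : Int) + 1, 2 * (n : Int) + 2] := by
      rw [show (2 * ((n : Int) + 1) + 1) = (2 * (n : Int) + 2) + 1 by ring,
          PySem.List.pyRange_one_succ_right (by omega),
          show (2 * (n : Int) + 2) = (2 * (n : Int) + 1) + 1 by ring,
          PySem.List.pyRange_one_succ_right (by omega)]
      simp
    push_cast
    rw [hsplit, List.foldl_append, ih hn' hL']
    -- two remaining steps: indices 2n+1 (odd) and 2n+2 (even)
    have hodd : ((2 * (n : Int) + 1) % 2 == 0) = false := by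
      simp []
    have heven : ((2 * (n : Int) + 2) % 2 == 0) = true := by
      simp [show (2 * (n : Int) + 2) = 2 * ((n : Int) + 1) by ring, Int.mul_emod_right]
    have hlt : n < string.toList.length := by omega
    have hget : PySem.Str.pyGet? string (n : Int) = some string.toList[n] := by
      simp [List.getElem?_eq_getElem hlt]
    obtain ⟨r, hr⟩ : ∃ r, L - (2 * n + 1) = r + 2 := ⟨L - (2 * n + 3), by omega⟩
    have hPlen : (pvInterleave (string.toList.take n)).length = 2 * n + 1 := by
      rw [pvInterleave_length, List.length_take, Nat.min_eq_left hn']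
    simp only [List.foldl_cons, List.foldl_nil, pvStep, hodd, heven, hget,
      reduceIte]
    rw [hr, if_neg (show ¬(false = true) from by simp)]
    simp only [Option.map_some, Option.getD_some]
    have hset1 : PySem.List.pySetD
        (pvInterleave (string.toList.take n) ++ List.replicate (r + 2) "")
        (2 * (n : Int) + 1) (String.mk [string.toList[n]])
        = pvInterleave (string.toList.take n)
          ++ (String.mk [string.toList[n]] :: List.replicate (r + 1) "") := by
      rw [PySem.List.pySetD_of_nonneg,
          show (2 * (n : Int) + 1).toNat = (pvInterleave (string.toList.take n)).length + 0 by omega,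
          pvSet_append_right]
      · simp [List.replicate_succ]
      · omega
    rw [hset1,
        PySem.List.pySetD_of_nonneg,
        show (2 * (n : Int) + 2).toNat = (pvInterleave (string.toList.take n)).length + 1 by omega,
        pvSet_append_right]
    have htake : string.toList.take (n + 1) = string.toList.take n ++ [string.toList[n]] :=
      List.take_succ_eq_append_getElem hlt
    refine Prod.ext ?_ ?_
    · show _ ++ (List.set (String.mk [string.toList[n]] :: List.replicate (r + 1) "") 1 "#") = _
      rw [List.replicate_succ, List.set_cons_succ, List.set_cons_zero]
      rw [show L - (2 * (n + 1) + 1) = r by omega, htake]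
      simp [pvInterleave, List.flatMap_append]
      rw [htake, List.flatMap_append]
      simp
    · simp
    · omega

-- ===== VERDICT (by name: the statement is the Claim_ definition above) =====
theorem manacherString_spec : Claim_equal_manacherString := by
  intro string _
  unfold Spec_manacherString manacherString manacherString_alt
  have hinit : (PySem.List.pyRange 0 (PySem.Str.len string * 2 + 1) 1).map
      (fun _ => ("" : String)) = List.replicate (2 * string.toList.length + 1) "" := by
    rw [List.map_const']
    congr 1
    rw [PySem.List.length_pyRange_one]
    simp [PySem.Str.len]
    omega
  simp only [hinit, List.length_replicate]
  have := pvLoop_inv string string.toList.length (2 * string.toList.length + 1) le_rfl le_rfl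
  rw [List.take_length] at this
  rw [show ((2 * string.toList.length + 1 : Nat) : Int) = 2 * (string.toList.length : Int) + 1 by push_cast; ring]
  rw [show (PySem.List.pyRange 0 (2*(string.toList.length:Int)+1) 1).foldl
        (fun (st : List String × Int) i =>
          if i % 2 == 0 then (PySem.List.pySetD st.1 i "#", st.2)
          else (PySem.List.pySetD st.1 i (((PySem.Str.pyGet? string st.2).map (fun c => String.mk [c])).getD ""), st.2 + 1))
        (List.replicate (2*string.toList.length+1) "", 0)
      = (PySem.List.pyRange 0 (2*(string.toList.length:Int)+1) 1).foldl (pvStep string)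
        (List.replicate (2*string.toList.length+1) "", 0) from rfl, this]
  rw [PySem.List.foldl_append_eq_flatMap]
  simp [pvInterleave]
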